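-- pv_equiv track=rewrite | github.com/filipp-g/magneto | tools/analyse.py | get_max_delta
-- ===== SOURCE A (Python) =====
-- def get_max_delta(data):
--     output = []
--
--     # date, min, max
--     cache = {}
--
--     for station, values in data.items():
--         for x, y in values['data']:
--             if x not in cache:
--                 cache[x] = {'min': 9999999, 'max': -1}
--             cache[x]['min'] = min(cache[x]['min'], y)
--             cache[x]['max'] = max(cache[x]['max'], y)
--     return cache
-- ===== SOURCE B (Python) =====
-- def get_max_delta(data):
--     # group every y by its date x (first-appearance order), then reduce each group
--     groups = {}
--     for station, values in data.items():
--         for x, y in values['data']: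
--             groups.setdefault(x, []).append(y)
--     return {x: {'min': min([9999999] + ys), 'max': max([-1] + ys)}
--             for x, ys in groups.items()}
-- ===== Notes on version B (the rewrite author's own statement) =====
-- stated objective: alternative
-- what changed: Replaces the single streaming fold that updates a per-date min/max record in place with a two-pass group-by: first collect every y into a list keyed by its date, then reduce each list with the seeded min/max.
import Mathlib
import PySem

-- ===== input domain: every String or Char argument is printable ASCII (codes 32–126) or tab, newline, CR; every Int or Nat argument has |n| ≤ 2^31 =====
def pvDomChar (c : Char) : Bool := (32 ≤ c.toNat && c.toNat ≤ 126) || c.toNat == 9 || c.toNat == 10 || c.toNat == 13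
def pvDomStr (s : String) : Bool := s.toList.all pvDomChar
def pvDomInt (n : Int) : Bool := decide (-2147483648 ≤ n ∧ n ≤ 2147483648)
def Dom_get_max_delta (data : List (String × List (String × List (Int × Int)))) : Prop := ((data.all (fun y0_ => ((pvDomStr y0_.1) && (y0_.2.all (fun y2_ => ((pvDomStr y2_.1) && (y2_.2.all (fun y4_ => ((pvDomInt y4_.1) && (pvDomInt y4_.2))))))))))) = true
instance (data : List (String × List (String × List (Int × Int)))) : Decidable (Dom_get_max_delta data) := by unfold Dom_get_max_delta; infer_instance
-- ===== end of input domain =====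

-- B replaces A's in-place streaming min/max fold by a group-by-date pass followed by a
-- seeded reduce of each group (alternative decomposition, same cost).

-- ===== PORT A =====
-- values['data']: first-match dict lookup; none = KeyError, excluded by Pre_ (getD [] is unreachable under Pre_)
def pvDataA (values : List (String × List (Int × Int))) : List (Int × Int) :=
  ((PySem.Dict.mk values).get? "data").getD []

-- the body of A's inner loop on one point (x, y)
def pvStepA (c : PySem.Dict Int (PySem.Dict String Int)) (xy : Int × Int) :
    PySem.Dict Int (PySem.Dict String Int) :=
  let x := xy.1; let y := xy.2
  -- if x not in cache: cache[x] = {'min': 9999999, 'max': -1}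
  let c := if c.contains x then c else c.insert x (PySem.Dict.mk [("min", 9999999), ("max", -1)])
  -- cache[x]['min'] = min(cache[x]['min'], y)   (both lookups always hit; the getD defaults are unreachable)
  let dx := (c.get? x).getD PySem.Dict.empty
  let c := c.insert x (dx.insert "min" (min ((dx.get? "min").getD 0) y))
  -- cache[x]['max'] = max(cache[x]['max'], y)
  let dx2 := (c.get? x).getD PySem.Dict.empty
  c.insert x (dx2.insert "max" (max ((dx2.get? "max").getD 0) y))

def get_max_delta (data : List (String × List (String × List (Int × Int)))) :
    List (Int × List (String × Int)) :=
  (data.foldl (fun c sv => (pvDataA sv.2).foldl pvStepA c) PySem.Dict.empty).items.map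
    (fun p => (p.1, p.2.items))

-- ===== PORT B =====
-- values['data'] in B, same first-match lookup (KeyError excluded by Pre_)
def pvDataB (values : List (String × List (Int × Int))) : List (Int × Int) :=
  ((PySem.Dict.mk values).get? "data").getD []

-- groups.setdefault(x, []).append(y): overwrite in place / append a fresh key
def pvStepB (g : PySem.Dict Int (List Int)) (xy : Int × Int) : PySem.Dict Int (List Int) :=
  g.insert xy.1 (g.getD xy.1 [] ++ [xy.2])

def get_max_delta_alt (data : List (String × List (String × List (Int × Int)))) :
    List (Int × List (String × Int)) :=
  let groups := data.foldl (fun g sv => (pvDataB sv.2).foldl pvStepB g) PySem.Dict.empty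
  -- dict comprehension over groups.items(); group keys are distinct, so it keeps their order
  groups.items.map (fun p =>
    (p.1, [("min", p.2.foldl min 9999999), ("max", p.2.foldl max (-1))]))

-- ===== PRECONDITION & SPEC =====
-- A (and B) raise KeyError when some station's dict has no key "data"; exactly those inputs are excluded.
def Pre_get_max_delta (data : List (String × List (String × List (Int × Int)))) : Prop :=
  (data.all (fun sv => sv.2.any (fun kv => kv.1 == "data"))) = true
instance (data : List (String × List (String × List (Int × Int)))) : Decidable (Pre_get_max_delta data) := by unfold Pre_get_max_delta; infer_instance

def pvWitness_get_max_delta : (List (String × List (String × List (Int × Int)))) :=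
  [("s1", [("data", [(1, 5), (2, 7), (1, 3)])]), ("s2", [("data", [(2, 11)])])]

def Spec_get_max_delta (data : List (String × List (String × List (Int × Int)))) (out : List (Int × List (String × Int))) : Prop := out = get_max_delta_alt data
instance (data : List (String × List (String × List (Int × Int)))) (out : List (Int × List (String × Int))) : Decidable (Spec_get_max_delta data out) := by unfold Spec_get_max_delta; infer_instance

-- ===== CLAIM (what is proved, stated in full; the proofs are below) =====
def Claim_equal_get_max_delta : Prop := ∀ (data : List (String × List (String × List (Int × Int)))), Dom_get_max_delta data → Pre_get_max_delta data → Spec_get_max_delta data (get_max_delta data)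

-- ===== LEMMAS AND PROOFS =====
def pvTfv (ys : List Int) : PySem.Dict String Int :=
  PySem.Dict.mk [("min", ys.foldl min 9999999), ("max", ys.foldl max (-1))]
def pvTrans (g : PySem.Dict Int (List Int)) : PySem.Dict Int (PySem.Dict String Int) :=
  PySem.Dict.mk (g.items.map (fun p => (p.1, pvTfv p.2)))
theorem pvTrans_contains (g : PySem.Dict Int (List Int)) (x : Int) :
    (pvTrans g).contains x = g.contains x := by
  obtain ⟨l⟩ := g
  simp [pvTrans, PySem.Dict.contains, List.any_map, Function.comp_def]
theorem pvTrans_get? (g : PySem.Dict Int (List Int)) (x : Int) :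
    (pvTrans g).get? x = (g.get? x).map pvTfv := by
  obtain ⟨l⟩ := g
  induction l with
  | nil => simp [pvTrans, PySem.Dict.get?]
  | cons h t ih =>
    obtain ⟨k, v⟩ := h
    simp only [pvTrans, List.map_cons, PySem.Dict.get?_mk_cons] at *
    split <;> simp_all
theorem pv_ins_min (a b v : Int) :
    (PySem.Dict.mk [("min", a), ("max", b)]).insert "min" v = PySem.Dict.mk [("min", v), ("max", b)] := by
  apply PySem.Dict.ext
  rw [PySem.Dict.items_insert_of_contains] <;> simp [PySem.Dict.contains]
theorem pv_ins_max (a b v : Int) :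
    (PySem.Dict.mk [("min", a), ("max", b)]).insert "max" v = PySem.Dict.mk [("min", a), ("max", v)] := by
  apply PySem.Dict.ext
  rw [PySem.Dict.items_insert_of_contains] <;> simp [PySem.Dict.contains]
theorem pvTrans_insert (g : PySem.Dict Int (List Int)) (x : Int) (zs : List Int) :
    (pvTrans g).insert x (pvTfv zs) = pvTrans (g.insert x zs) := by
  apply PySem.Dict.ext
  by_cases h : g.contains x = true
  · have hc : (pvTrans g).contains x = true := by rw [pvTrans_contains]; exact h
    rw [PySem.Dict.items_insert_of_contains _ _ hc]
    conv_rhs => rw [pvTrans]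
    rw [PySem.Dict.items_insert_of_contains _ _ h]
    simp only [pvTrans, List.map_map]
    apply List.map_congr_left
    intro p _
    by_cases hp : p.1 = x <;> simp [hp]
  · have hc : (pvTrans g).contains x = false := by rw [pvTrans_contains]; simpa using h
    rw [PySem.Dict.items_insert_of_not_contains _ _ hc]
    conv_rhs => rw [pvTrans]
    rw [PySem.Dict.items_insert_of_not_contains _ _ (by simpa using h)]
    simp [pvTrans]

theorem pv_step (g : PySem.Dict Int (List Int)) (xy : Int × Int) :
    pvStepA (pvTrans g) xy = pvTrans (pvStepB g xy) := by
  obtain ⟨x, y⟩ := xy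
  by_cases h : g.contains x = true
  · cases hys : g.get? x with
    | none =>
      rw [PySem.Dict.get?_eq_none_iff_contains] at hys
      simp_all
    | some ys =>
      have htv : pvTfv (ys ++ [y]) = PySem.Dict.mk [("min", min (ys.foldl min 9999999) y), ("max", max (ys.foldl max (-1)) y)] := by
        simp [pvTfv, List.foldl_append]
      simp only [pvStepA, pvStepB, pvTrans_contains, h, if_true,
        PySem.Dict.getD_eq_get?_getD, hys, pvTrans_get?, Option.map_some, Option.getD_some,
        pvTfv, PySem.Dict.get?_mk_cons]
      norm_num [pv_ins_min, pv_ins_max, PySem.Dict.get?_insert_self, PySem.Dict.insert_insert_self,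
        PySem.Dict.get?_mk_cons]
      rw [if_neg (by decide : ¬("min" : String) = "max"), Option.getD_some, ← htv, pvTrans_insert]
  · have h' : g.contains x = false := by simpa using h
    have hys : g.get? x = none := by rw [PySem.Dict.get?_eq_none_iff_contains, h']
    simp only [pvStepA, pvStepB, pvTrans_contains, h', Bool.false_eq_true, if_false,
      PySem.Dict.getD_eq_get?_getD, hys, Option.getD_none, PySem.Dict.get?_insert_self,
      Option.getD_some, PySem.Dict.get?_mk_cons]
    norm_num [pv_ins_min, pv_ins_max, PySem.Dict.insert_insert_self, PySem.Dict.get?_mk_cons,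
      PySem.Dict.get?_insert_self]
    have : (PySem.Dict.mk [("min", min 9999999 y), ("max", max (-1) y)]) = pvTfv [y] := by
      simp [pvTfv]
    rw [if_neg (by decide : ¬("min" : String) = "max"), Option.getD_some, this, pvTrans_insert]

theorem pv_main (L : List (Int × Int)) (g : PySem.Dict Int (List Int)) :
    L.foldl pvStepA (pvTrans g) = pvTrans (L.foldl pvStepB g) := by
  induction L generalizing g with
  | nil => rfl
  | cons p t ih =>
    simp only [List.foldl_cons, pv_step]
    exact ih _

theorem pvData_eq (v : List (String × List (Int × Int))) : pvDataA v = pvDataB v := rfl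

theorem pv_outer (data : List (String × List (String × List (Int × Int))))
    (g : PySem.Dict Int (List Int)) :
    data.foldl (fun c sv => (pvDataA sv.2).foldl pvStepA c) (pvTrans g)
      = pvTrans (data.foldl (fun g sv => (pvDataB sv.2).foldl pvStepB g) g) := by
  induction data generalizing g with
  | nil => rfl
  | cons sv t ih =>
    simp only [List.foldl_cons, pvData_eq, pv_main]
    exact ih _

-- ===== VERDICT (by name: the statement is the Claim_ definition above) =====
theorem get_max_delta_spec : Claim_equal_get_max_delta := by
  intro data _ _
  unfold Spec_get_max_delta get_max_delta get_max_delta_alt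
  have h0 : (PySem.Dict.empty : PySem.Dict Int (PySem.Dict String Int)) = pvTrans PySem.Dict.empty := rfl
  rw [h0, pv_outer]
  simp [pvTrans, List.map_map, pvTfv, Function.comp_def]
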